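-- pv_equiv track=rewrite | github.com/Fiberwise-AI/browser-test-auto | actions/command_actions.py | _extract_step_logs
-- ===== SOURCE A (Python) =====
-- def _extract_step_logs(session_logs, step_id):
--     """Extract all log entries related to a specific step."""
--     step_logs = []
--     in_step = False
--
--     for log_entry in session_logs:
--         step_name = log_entry.get('step', '')
--         if step_id in step_name:
--             in_step = True
--         elif in_step and 'Database' not in step_name and 'Query' not in step_name:
--             # Stop when we reach the next major step
--             break
--
--         if in_step:
--             step_logs.append(log_entry)
--
--     return step_logs
-- ===== SOURCE B (Python) =====
-- def _extract_step_logs(session_logs, step_id):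
--     """Extract all log entries related to a specific step.
--
--     Different decomposition: run-length-group the log by the keep-predicate
--     (name contains step_id, 'Database' or 'Query'), then return the suffix of
--     the first True-group that starts at its first entry naming step_id.
--     """
--     def keep(e):
--         name = e.get('step', '')
--         return step_id in name or 'Database' in name or 'Query' in name
--
--     # Stage 1: split the log into maximal runs of equal keep-value.
--     runs = []
--     cur = None
--     for e in session_logs:
--         k = keep(e)
--         if cur is not None and cur[0] == k:
--             cur[1].append(e)
--         else:
--             if cur is not None:
--                 runs.append(cur)
--             cur = (k, [e])
--     if cur is not None:
--         runs.append(cur)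
--
--     # Stage 2: first keep-run containing a step_id match; answer is that run
--     # from the match onwards.
--     for k, block in runs:
--         if k:
--             for i, e in enumerate(block):
--                 if step_id in e.get('step', ''):
--                     return block[i:]
--     return []
-- ===== Notes on version B (the rewrite author's own statement) =====
-- stated objective: alternative
-- what changed: Replaced A's single-pass boolean-flag state machine with a two-stage algorithm: first run-length-group the log into maximal runs of equal keep-value (name contains step_id, 'Database' or 'Query'), then return the suffix of the first keep-run starting at its first entry whose name contains step_id.
import Mathlib
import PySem

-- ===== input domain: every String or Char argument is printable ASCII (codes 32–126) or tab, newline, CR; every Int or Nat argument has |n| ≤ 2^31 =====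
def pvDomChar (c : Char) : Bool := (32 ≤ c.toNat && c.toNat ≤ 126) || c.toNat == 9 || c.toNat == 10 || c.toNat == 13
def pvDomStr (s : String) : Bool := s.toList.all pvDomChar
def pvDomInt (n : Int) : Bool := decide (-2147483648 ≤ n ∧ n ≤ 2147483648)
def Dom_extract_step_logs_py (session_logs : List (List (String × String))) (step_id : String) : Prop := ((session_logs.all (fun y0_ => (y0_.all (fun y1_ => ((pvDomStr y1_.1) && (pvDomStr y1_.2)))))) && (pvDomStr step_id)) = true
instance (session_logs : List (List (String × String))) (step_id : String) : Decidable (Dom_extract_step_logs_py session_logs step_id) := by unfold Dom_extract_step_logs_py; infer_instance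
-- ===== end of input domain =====

-- B replaces A's boolean-flag scan with a different decomposition: run-length grouping of the
-- log by the keep-predicate, then a search over the groups (objective: alternative, same cost).


-- ===== PORT A =====
-- the for-loop with `break` and the (step_logs, in_step) state, as structural recursion
def extract_step_logs_py_go (step_id : String) (logs : List (List (String × String)))
    (step_logs : List (List (String × String))) (in_step : Bool) : List (List (String × String)) :=
  match logs with
  | [] => step_logs
  | log_entry :: rest =>
    let step_name := PySem.Dict.getD (PySem.Dict.mk log_entry) "step" ""
    if PySem.Str.isIn step_id step_name then
      -- in_step = True; then `if in_step:` appends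
      extract_step_logs_py_go step_id rest (step_logs ++ [log_entry]) true
    else if in_step && !(PySem.Str.isIn "Database" step_name) && !(PySem.Str.isIn "Query" step_name) then
      step_logs  -- break
    else if in_step then
      extract_step_logs_py_go step_id rest (step_logs ++ [log_entry]) in_step
    else
      extract_step_logs_py_go step_id rest step_logs in_step

def extract_step_logs_py (session_logs : List (List (String × String))) (step_id : String) : List (List (String × String)) :=
  extract_step_logs_py_go step_id session_logs [] false

-- ===== PORT B =====
-- Source B's keep-predicate: the step name contains step_id, 'Database' or 'Query'
def pvKeep (step_id : String) (e : List (String × String)) : Bool :=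
  let name := PySem.Dict.getD (PySem.Dict.mk e) "step" ""
  PySem.Str.isIn step_id name || PySem.Str.isIn "Database" name || PySem.Str.isIn "Query" name

-- Source B stage 1 loop body: state = (runs so far, current run or None)
def pvGroupStep (step_id : String)
    (st : List (Bool × List (List (String × String))) × Option (Bool × List (List (String × String))))
    (e : List (String × String)) :
    List (Bool × List (List (String × String))) × Option (Bool × List (List (String × String))) :=
  let k := pvKeep step_id e
  match st.2 with
  | some cur => if cur.1 == k then (st.1, some (cur.1, cur.2 ++ [e]))
                else (st.1 ++ [cur], some (k, [e]))
  | none => (st.1, some (k, [e]))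

-- Source B inner loop: `for i, e in enumerate(block): if step_id in ...: return block[i:]`
def pvFindSuffix (step_id : String) : List (List (String × String)) → Option (List (List (String × String)))
  | [] => none
  | e :: rest =>
    if PySem.Str.isIn step_id (PySem.Dict.getD (PySem.Dict.mk e) "step" "") then some (e :: rest)
    else pvFindSuffix step_id rest

-- Source B stage 2 loop over the runs
def pvScanRuns (step_id : String) : List (Bool × List (List (String × String))) → List (List (String × String))
  | [] => []
  | (k, block) :: rest =>
    if k then
      match pvFindSuffix step_id block with
      | some s => s
      | none => pvScanRuns step_id rest
    else pvScanRuns step_id rest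

def extract_step_logs_py_alt (session_logs : List (List (String × String))) (step_id : String) : List (List (String × String)) :=
  let st := session_logs.foldl (pvGroupStep step_id) ([], none)
  let runs := match st.2 with
    | none => st.1
    | some cur => st.1 ++ [cur]
  pvScanRuns step_id runs

-- ===== PRECONDITION & SPEC =====
def Spec_extract_step_logs_py (session_logs : List (List (String × String))) (step_id : String) (out : List (List (String × String))) : Prop := out = extract_step_logs_py_alt session_logs step_id
instance (session_logs : List (List (String × String))) (step_id : String) (out : List (List (String × String))) : Decidable (Spec_extract_step_logs_py session_logs step_id out) := by unfold Spec_extract_step_logs_py; infer_instance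

-- ===== CLAIM (what is proved, stated in full; the proofs are below) =====
def Claim_equal_extract_step_logs_py : Prop := ∀ (session_logs : List (List (String × String))) (step_id : String), Dom_extract_step_logs_py session_logs step_id → Spec_extract_step_logs_py session_logs step_id (extract_step_logs_py session_logs step_id)

-- ===== LEMMAS AND PROOFS =====

-- 'step_id in e.get("step","")', the start/match test shared by both readings
def pvP (step_id : String) (e : List (String × String)) : Bool :=
  PySem.Str.isIn step_id (PySem.Dict.getD (PySem.Dict.mk e) "step" "")

-- canonical value: from the first entry matching step_id, the pvKeep-prefix
def pvC (step_id : String) : List (List (String × String)) → List (List (String × String))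
  | [] => []
  | e :: rest => if pvP step_id e then e :: rest.takeWhile (pvKeep step_id) else pvC step_id rest

theorem pvP_imp_keep (step_id : String) (e : List (String × String)) (h : pvP step_id e = true) :
    pvKeep step_id e = true := by
  unfold pvP at h
  simp only [pvKeep, h, Bool.true_or]

theorem pv_keep_false_p (step_id : String) (e : List (String × String))
    (h : pvKeep step_id e = false) : pvP step_id e = false := by
  cases hp : pvP step_id e with
  | false => rfl
  | true => rw [pvP_imp_keep _ _ hp] at h; exact absurd h (by simp)

-- ===== A-side characterisation =====
theorem pv_go_true (step_id : String) (logs acc : List (List (String × String))) :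
    extract_step_logs_py_go step_id logs acc true = acc ++ logs.takeWhile (pvKeep step_id) := by
  induction logs generalizing acc with
  | nil => simp [extract_step_logs_py_go]
  | cons e rest ih =>
    simp only [extract_step_logs_py_go, List.takeWhile_cons]
    by_cases hp : PySem.Str.isIn step_id (PySem.Dict.getD (PySem.Dict.mk e) "step" "") = true
    · have hq : pvKeep step_id e = true := pvP_imp_keep _ _ hp
      rw [if_pos hp, if_pos hq, ih, List.append_assoc, List.singleton_append]
    · rw [if_neg hp]
      rw [Bool.not_eq_true] at hp
      by_cases hb : (true && !PySem.Str.isIn "Database" (PySem.Dict.getD (PySem.Dict.mk e) "step" "")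
          && !PySem.Str.isIn "Query" (PySem.Dict.getD (PySem.Dict.mk e) "step" "")) = true
      · have hb' := hb
        simp only [Bool.true_and, Bool.and_eq_true, Bool.not_eq_true'] at hb'
        have hq : pvKeep step_id e = false := by
          simp only [pvKeep, hp, hb'.1, hb'.2, Bool.or_false]
        rw [if_pos hb, if_neg (by rw [hq]; exact Bool.false_ne_true), List.append_nil]
      · have hb' := hb
        simp only [Bool.true_and, Bool.and_eq_true, Bool.not_eq_true', not_and_or,
          Bool.not_eq_false] at hb'
        have hq : pvKeep step_id e = true := by
          rcases hb' with h | h <;> simp only [pvKeep, h, Bool.or_true, Bool.true_or]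
        rw [if_neg hb, if_pos trivial, if_pos hq, ih, List.append_assoc, List.singleton_append]

theorem pv_go_false (step_id : String) (logs acc : List (List (String × String))) :
    extract_step_logs_py_go step_id logs acc false = acc ++ pvC step_id logs := by
  induction logs generalizing acc with
  | nil => simp [extract_step_logs_py_go, pvC]
  | cons e rest ih =>
    simp only [extract_step_logs_py_go, pvC]
    by_cases hp : PySem.Str.isIn step_id (PySem.Dict.getD (PySem.Dict.mk e) "step" "") = true
    · have hpp : pvP step_id e = true := hp
      rw [if_pos hp, if_pos hpp, pv_go_true, List.append_assoc, List.singleton_append]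
    · have hpp : pvP step_id e = false := by rwa [Bool.not_eq_true] at hp
      rw [if_neg hp]
      simp only [Bool.false_and, Bool.false_eq_true, if_false, ih, hpp]

-- ===== B-side characterisation =====
-- closed recursive form of stage 1's fold continued from a live current run (k, blk)
def pvExtendRuns (step_id : String) :
    Bool → List (List (String × String)) → List (List (String × String)) →
      List (Bool × List (List (String × String)))
  | k, blk, [] => [(k, blk)]
  | k, blk, x :: xs =>
    if pvKeep step_id x == k then pvExtendRuns step_id k (blk ++ [x]) xs
    else (k, blk) :: pvExtendRuns step_id (pvKeep step_id x) [x] xs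

theorem pv_foldl_extend (step_id : String) (xs : List (List (String × String))) :
    ∀ runs k blk,
      (match (xs.foldl (pvGroupStep step_id) (runs, some (k, blk))).2 with
       | none => (xs.foldl (pvGroupStep step_id) (runs, some (k, blk))).1
       | some cur => (xs.foldl (pvGroupStep step_id) (runs, some (k, blk))).1 ++ [cur]) =
      runs ++ pvExtendRuns step_id k blk xs := by
  induction xs with
  | nil => intro runs k blk; simp [pvExtendRuns]
  | cons x xs ih =>
    intro runs k blk
    simp only [List.foldl_cons, pvGroupStep]
    by_cases h : k == pvKeep step_id x
    · have hk : pvKeep step_id x = k := (beq_iff_eq.mp h).symm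
      simp only [if_true, pvExtendRuns, hk, beq_self_eq_true]
      exact ih runs k (blk ++ [x])
    · have hk : (pvKeep step_id x == k) = false := by
        rw [beq_eq_false_iff_ne]
        intro hc
        exact h (by rw [hc]; exact beq_self_eq_true k)
      simp only [eq_false_of_ne_true h, Bool.false_eq_true, if_false, pvExtendRuns, hk,
        ih (runs ++ [(k, blk)]) (pvKeep step_id x) [x], List.append_assoc, List.singleton_append]

theorem pv_findSuffix_append (step_id : String) (blk : List (List (String × String)))
    (x : List (String × String)) :
    pvFindSuffix step_id (blk ++ [x]) =
      match pvFindSuffix step_id blk with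
      | some s => some (s ++ [x])
      | none => if pvP step_id x then some [x] else none := by
  induction blk with
  | nil => simp [pvFindSuffix, pvP]
  | cons e rest ih =>
    simp only [List.cons_append, pvFindSuffix]
    by_cases hp : PySem.Str.isIn step_id (PySem.Dict.getD (PySem.Dict.mk e) "step" "") = true
    · simp only [PySem.Str.isIn_eq] at hp
      simp [hp]
    · simp only [PySem.Str.isIn_eq] at hp
      simp [hp, ih]

theorem pv_scan_extend (step_id : String) (xs : List (List (String × String))) :
    ∀ (k : Bool) (blk : List (List (String × String))),
      (∀ y ∈ blk, pvKeep step_id y = k) →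
      pvScanRuns step_id (pvExtendRuns step_id k blk xs) =
        (match k, pvFindSuffix step_id blk with
         | true, some s => s ++ xs.takeWhile (pvKeep step_id)
         | _, _ => pvC step_id xs) := by
  induction xs with
  | nil =>
    intro k blk _
    cases k with
    | false => simp [pvExtendRuns, pvScanRuns, pvC]
    | true =>
      simp only [pvExtendRuns, pvScanRuns, if_true]
      cases h : pvFindSuffix step_id blk <;> simp [pvC]
  | cons x xs ih =>
    intro k blk hblk
    by_cases hkx : pvKeep step_id x = k
    · simp only [pvExtendRuns, hkx, beq_self_eq_true, if_true]
      rw [ih k (blk ++ [x]) (by intro y hy; rcases List.mem_append.mp hy with h | h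
                                · exact hblk y h
                                · simp only [List.mem_singleton] at h; rw [h]; exact hkx)]
      cases k with
      | false =>
        have hpx : pvP step_id x = false := pv_keep_false_p _ _ hkx
        simp [pvC, hpx]
      | true =>
        rw [pv_findSuffix_append]
        cases hfs : pvFindSuffix step_id blk with
        | some s => simp [hkx]
        | none =>
          by_cases hpx : pvP step_id x = true
          · simp [hpx, pvC]
          · rw [Bool.not_eq_true] at hpx
            simp [hpx, pvC]
    · have hne : (pvKeep step_id x == k) = false := by
        rw [beq_eq_false_iff_ne]; exact hkx
      simp only [pvExtendRuns, hne, Bool.false_eq_true, if_false]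
      cases k with
      | true =>
        have hkx' : pvKeep step_id x = false := by
          cases h : pvKeep step_id x with
          | false => rfl
          | true => exact absurd h hkx
        have hpx : pvP step_id x = false := pv_keep_false_p _ _ hkx'
        simp only [pvScanRuns, if_true, hkx']
        cases hfs : pvFindSuffix step_id blk with
        | some s => simp [hkx']
        | none =>
          rw [ih false [x] (by intro y hy; simp only [List.mem_singleton] at hy; rw [hy]; exact hkx')]
          simp [pvC, hpx]
      | false =>
        have hkx' : pvKeep step_id x = true := by
          cases h : pvKeep step_id x with
          | true => rfl
          | false => exact absurd h hkx
        simp only [pvScanRuns, Bool.false_eq_true, if_false, hkx']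
        rw [ih true [x] (by intro y hy; simp only [List.mem_singleton] at hy; rw [hy]; exact hkx')]
        by_cases hpx : pvP step_id x = true
        · have hfs1 : pvFindSuffix step_id [x] = some [x] := by
            simp only [pvFindSuffix]
            simp only [pvP, PySem.Str.isIn_eq] at hpx
            simp [hpx]
          simp [hfs1, pvC, hpx]
        · rw [Bool.not_eq_true] at hpx
          have hfs1 : pvFindSuffix step_id [x] = none := by
            simp only [pvFindSuffix]
            simp only [pvP, PySem.Str.isIn_eq] at hpx
            simp [hpx]
          simp [hfs1, pvC, hpx]

theorem pv_alt_eq_pvC (session_logs : List (List (String × String))) (step_id : String) :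
    extract_step_logs_py_alt session_logs step_id = pvC step_id session_logs := by
  cases session_logs with
  | nil => rfl
  | cons x xs =>
    simp only [extract_step_logs_py_alt, List.foldl_cons, pvGroupStep]
    rw [pv_foldl_extend step_id xs [] (pvKeep step_id x) [x], List.nil_append]
    rw [pv_scan_extend step_id xs (pvKeep step_id x) [x]
      (by intro y hy; simp only [List.mem_singleton] at hy; rw [hy])]
    by_cases hpx : pvP step_id x = true
    · have hkx : pvKeep step_id x = true := pvP_imp_keep _ _ hpx
      have hfs1 : pvFindSuffix step_id [x] = some [x] := by
        simp only [pvFindSuffix]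
        simp only [pvP, PySem.Str.isIn_eq] at hpx
        simp [hpx]
      simp [hkx, hfs1, pvC, hpx]
    · rw [Bool.not_eq_true] at hpx
      have hfs1 : pvFindSuffix step_id [x] = none := by
        simp only [pvFindSuffix]
        simp only [pvP, PySem.Str.isIn_eq] at hpx
        simp [hpx]
      cases hkx : pvKeep step_id x <;> simp [hfs1, pvC, hpx]

-- ===== VERDICT (by name: the statement is the Claim_ definition above) =====
theorem extract_step_logs_py_spec : Claim_equal_extract_step_logs_py := by
  intro session_logs step_id _
  unfold Spec_extract_step_logs_py extract_step_logs_py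
  rw [pv_go_false, List.nil_append, pv_alt_eq_pvC]
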